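-- pv_equiv track=rewrite | github.com/MatLBS/backend-magicnotes | utils.py | normalize_highlighted_text
-- ===== SOURCE A (Python) =====
-- def normalize_highlighted_text(text_list):
-- 	# Étape 1: Supprimer les entrées vides
-- 	cleaned = [word for word in text_list if word.strip()]
--
-- 	# Étape 2: Réunir les mots séparés par '-'
-- 	normalized = []
-- 	i = 0
-- 	while i < len(cleaned):
-- 		current_word = cleaned[i]
--
-- 		# Si le mot se termine par '-', chercher le mot suivant
-- 		if current_word.endswith('-'):
-- 			if i + 1 < len(cleaned):
-- 				# Enlever le '-' et joindre avec le mot suivant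
-- 				combined_word = current_word[:-1] + cleaned[i + 1]
-- 				normalized.append(combined_word)
-- 				i += 2  # Sauter le mot suivant car il a été combiné
-- 			else:
-- 				# Si c'est le dernier mot, garder tel quel
-- 				normalized.append(current_word)
-- 				i += 1
-- 		else:
-- 			normalized.append(current_word)
-- 			i += 1
--
-- 	return normalized
-- ===== SOURCE B (Python) =====
-- def normalize_highlighted_text(text_list):
--     normalized = []
--     pending = None  # a word ending in '-' waiting for its continuation
--     for word in text_list:
--         if not word.strip():
--             continue  # skip empty entries
--         if pending is not None:
--             normalized.append(pending[:-1] + word)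
--             pending = None
--         elif word.endswith('-'):
--             pending = word
--         else:
--             normalized.append(word)
--     if pending is not None:
--         normalized.append(pending)
--     return normalized
-- ===== Notes on version B (the rewrite author's own statement) =====
-- stated objective: simpler
-- what changed: Replaces the filter pass plus the index-walking while loop (with i+=2 skips) by one streaming pass over the input that skips blank words and keeps a single pending hyphen-ended word, merging it with the next kept word.
import Mathlib
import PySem

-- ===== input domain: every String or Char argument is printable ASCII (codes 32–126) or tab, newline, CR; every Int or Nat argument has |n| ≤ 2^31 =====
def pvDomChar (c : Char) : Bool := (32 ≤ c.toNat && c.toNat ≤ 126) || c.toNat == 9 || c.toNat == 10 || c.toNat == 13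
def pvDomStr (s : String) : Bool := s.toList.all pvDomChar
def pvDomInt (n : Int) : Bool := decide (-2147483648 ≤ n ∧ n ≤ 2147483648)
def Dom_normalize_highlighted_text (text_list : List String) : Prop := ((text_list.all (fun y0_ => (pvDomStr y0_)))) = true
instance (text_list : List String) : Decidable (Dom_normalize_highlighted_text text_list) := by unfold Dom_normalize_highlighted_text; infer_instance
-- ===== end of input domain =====

-- B replaces A's two passes (filter comprehension + index-walking while loop) by one
-- streaming pass with a single pending hyphen-ended word; same return value (objective: simpler).


-- ===== PORT A =====
-- the while loop over `cleaned`, index i advancing by 1 or 2, as recursion on the remaining suffix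
def pvWalkA : List String → List String
  | [] => []
  | w :: rest =>
    if PySem.Str.endswith w "-" then
      match rest with
      | [] => [w]
      | x :: rest' => (PySem.Str.slice w none (some (-1)) ++ x) :: pvWalkA rest'
    else w :: pvWalkA rest

def normalize_highlighted_text (text_list : List String) : List String :=
  pvWalkA (text_list.filter (fun word => !(PySem.Str.strip word == "")))

-- ===== PORT B =====
-- one streaming pass: `pending` holds a hyphen-ended word waiting for its continuation
def pvGoB : Option String → List String → List String
  | pending, [] =>
    match pending with
    | some p => [p]
    | none => []
  | pending, word :: rest =>
    if PySem.Str.strip word == "" then pvGoB pending rest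
    else
      match pending with
      | some p => (PySem.Str.slice p none (some (-1)) ++ word) :: pvGoB none rest
      | none =>
        if PySem.Str.endswith word "-" then pvGoB (some word) rest
        else word :: pvGoB none rest

def normalize_highlighted_text_alt (text_list : List String) : List String :=
  pvGoB none text_list

-- ===== PRECONDITION & SPEC =====
def Spec_normalize_highlighted_text (text_list : List String) (out : List String) : Prop := out = normalize_highlighted_text_alt text_list
instance (text_list : List String) (out : List String) : Decidable (Spec_normalize_highlighted_text text_list out) := by unfold Spec_normalize_highlighted_text; infer_instance

-- ===== CLAIM (what is proved, stated in full; the proofs are below) =====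
def Claim_equal_normalize_highlighted_text : Prop := ∀ (text_list : List String), Dom_normalize_highlighted_text text_list → Spec_normalize_highlighted_text text_list (normalize_highlighted_text text_list)

-- ===== LEMMAS AND PROOFS =====
theorem pvGoB_eq_pvWalkA (l : List String) :
    (pvGoB none l = pvWalkA (l.filter (fun w => !(PySem.Str.strip w == "")))) ∧
    (∀ w, PySem.Str.endswith w "-" = true →
      pvGoB (some w) l = pvWalkA (w :: l.filter (fun w => !(PySem.Str.strip w == "")))) := by
  induction l with
  | nil =>
    refine ⟨rfl, fun w hw => ?_⟩
    have hw' : PySem.Chars.endswith w.toList ['-'] = true := by simpa using hw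
    simp [pvGoB, pvWalkA, hw']
  | cons x l ih =>
    obtain ⟨ih1, ih2⟩ := ih
    by_cases hx : (PySem.Str.strip x == "") = true
    · refine ⟨?_, fun w hw => ?_⟩
      · simp [pvGoB, hx, ih1]
      · simp only [pvGoB, hx, if_true, List.filter_cons, Bool.not_true, Bool.false_eq_true,
          if_false]
        exact ih2 w hw
    · have hx' : (PySem.Str.strip x == "") = false := by simpa using hx
      refine ⟨?_, fun w hw => ?_⟩
      · by_cases he : PySem.Str.endswith x "-" = true
        · have he' : PySem.Chars.endswith x.toList ['-'] = true := by simpa using he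
          simp [pvGoB, hx', he']
          exact ih2 x he
        · have he' : PySem.Chars.endswith x.toList ['-'] = false := by
            have := (Bool.not_eq_true _).mp he
            simpa using this
          simp [pvGoB, hx', he', ih1]
          conv_rhs => rw [pvWalkA.eq_def]
          simp [he']
      · have hw' : PySem.Chars.endswith w.toList ['-'] = true := by simpa using hw
        simp [pvGoB, pvWalkA, hx', hw', ih1]

-- ===== VERDICT (by name: the statement is the Claim_ definition above) =====
theorem normalize_highlighted_text_spec : Claim_equal_normalize_highlighted_text := by
  intro text_list _
  unfold Spec_normalize_highlighted_text normalize_highlighted_text normalize_highlighted_text_alt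
  exact ((pvGoB_eq_pvWalkA text_list).1).symm
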